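-- pv_equiv track=rewrite | github.com/20hyukim/Algorithm | 백준/Silver/1541. 잃어버린 괄호/잃어버린 괄호.py | add_all
-- ===== SOURCE A (Python) =====
-- def add_all(nums, ops):
--     plus_n = ops.count('+')
--
--     for _ in range(plus_n):
--         i = ops.index('+')
--         if ops[i] == '+':
--             comb = nums[i] + nums[i+1]
--             nums = nums[:i] + [comb] + nums[i+2:]
--             ops = ops[:i] + ops[i+1:]
--
--     return nums, ops
-- ===== SOURCE B (Python) =====
-- def add_all(nums, ops):
--     new_nums = []
--     for j, x in enumerate(nums):
--         if j > 0 and j - 1 < len(ops) and ops[j - 1] == '+':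
--             new_nums[-1] += x
--         else:
--             new_nums.append(x)
--     new_ops = [op for op in ops if op != '+']
--     return new_nums, new_ops
-- ===== Notes on version B (the rewrite author's own statement) =====
-- stated objective: alternative
-- what changed: A repeatedly re-scans ops with count/index and rebuilds both lists by slicing once per '+'; B does one left-to-right pass over nums merging each element into the last group when the preceding op is '+', plus one filter over ops.
import Mathlib
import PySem

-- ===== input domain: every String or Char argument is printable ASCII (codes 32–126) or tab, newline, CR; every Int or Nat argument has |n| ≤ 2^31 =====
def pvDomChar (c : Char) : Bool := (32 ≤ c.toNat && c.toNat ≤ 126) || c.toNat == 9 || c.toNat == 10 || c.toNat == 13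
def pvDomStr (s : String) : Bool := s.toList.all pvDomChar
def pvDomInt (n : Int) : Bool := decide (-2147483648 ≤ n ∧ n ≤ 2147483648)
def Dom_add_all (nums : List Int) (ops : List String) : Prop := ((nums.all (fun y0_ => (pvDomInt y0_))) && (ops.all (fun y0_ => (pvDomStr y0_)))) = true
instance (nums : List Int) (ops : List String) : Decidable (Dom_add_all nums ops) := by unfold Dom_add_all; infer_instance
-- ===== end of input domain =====

-- B is a single left-to-right pass (one fold over nums + one filter over ops) instead of A's
-- repeated index/slice rebuilding (alternative algorithm, same cost in practice); equivalence is
-- claimed on Pre_ (exactly the inputs where A returns).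

-- ===== PORT A =====
-- one iteration of A's 'for _ in range(plus_n)' body, on the state (nums, ops)
def add_allStep (st : List Int × List String) : List Int × List String :=
  match PySem.List.index? st.2 "+" with
  | none => st          -- Python ValueError; unreachable: the loop runs once per '+' present
  | some i =>
    match PySem.List.pyGet? st.2 (i : Int) with
    | none => st        -- unreachable: i is a valid index of ops
    | some op =>
      if op == "+" then
        match PySem.List.pyGet? st.1 (i : Int), PySem.List.pyGet? st.1 ((i : Int) + 1) with
        | some a, some b =>
          (PySem.List.slice st.1 none (some (i : Int)) ++ [a + b] ++ PySem.List.slice st.1 (some ((i : Int) + 2)) none,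
           PySem.List.slice st.2 none (some (i : Int)) ++ PySem.List.slice st.2 (some ((i : Int) + 1)) none)
        | _, _ => st    -- Python IndexError; excluded by Pre_add_all
      else st

def add_all (nums : List Int) (ops : List String) : List Int × List String :=
  (List.range (PySem.List.count ops "+")).foldl (fun st _ => add_allStep st) (nums, ops)

-- ===== PORT B =====
def add_all_alt (nums : List Int) (ops : List String) : List Int × List String :=
  let new_nums := (PySem.List.enumerate nums 0).foldl
    (fun (acc : List Int) jx =>
      if jx.1 > 0 && decide (jx.1 - 1 < (ops.length : Int)) && (PySem.List.pyGet? ops (jx.1 - 1) == some "+")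
      then acc.dropLast ++ [(acc.getLast?.getD 0) + jx.2]   -- new_nums[-1] += x (acc nonempty when taken)
      else acc ++ [jx.2])
    []
  let new_ops := ops.filter (fun op => op != "+")
  (new_nums, new_ops)

-- ===== PRECONDITION & SPEC =====
-- Pre_: exactly the inputs on which A returns (A raises IndexError iff some '+' at index j has j+2 > len(nums))
def Pre_add_all (nums : List Int) (ops : List String) : Prop :=
  ∀ j < ops.length, ops.getD j "" = "+" → j + 2 ≤ nums.length
instance (nums : List Int) (ops : List String) : Decidable (Pre_add_all nums ops) := by unfold Pre_add_all; infer_instance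
def pvWitness_add_all : List Int × List String := ([1, 2, 3], ["+", "-"])

def Spec_add_all (nums : List Int) (ops : List String) (out : List Int × List String) : Prop := out = add_all_alt nums ops
instance (nums : List Int) (ops : List String) (out : List Int × List String) : Decidable (Spec_add_all nums ops out) := by unfold Spec_add_all; infer_instance

-- ===== CLAIM (what is proved, stated in full; the proofs are below) =====
def Claim_equal_add_all : Prop := ∀ (nums : List Int) (ops : List String), Dom_add_all nums ops → Pre_add_all nums ops → Spec_add_all nums ops (add_all nums ops)

-- ===== LEMMAS AND PROOFS =====

-- the common value both ports compute on Pre_: group nums by runs of '+' in ops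
def mergeGroups : List Int → List String → List Int
  | nums, "+" :: ops' =>
    match nums with
    | a :: b :: rest => mergeGroups ((a + b) :: rest) ops'
    | _ => []          -- only reached outside Pre_
  | [], _ => []
  | a :: rest, ops => a :: mergeGroups rest ops.tail
termination_by nums ops => nums.length + ops.length
decreasing_by all_goals simp_all [List.length_tail]; omega

theorem mergeGroups_no_plus (nums : List Int) (ops : List String) (h : "+" ∉ ops) :
    mergeGroups nums ops = nums := by
  induction nums generalizing ops with
  | nil => cases ops with
    | nil => simp [mergeGroups]
    | cons o t =>
      have : o ≠ "+" := fun h' => h (h' ▸ List.mem_cons_self)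
      rw [mergeGroups.eq_def]; simp_all
  | cons a rest ih =>
    cases ops with
    | nil => rw [mergeGroups.eq_def]; simp [ih [] (by simp)]
    | cons o t =>
      have ho : o ≠ "+" := fun h' => h (h' ▸ List.mem_cons_self)
      rw [mergeGroups.eq_def]
      simp_all [ih t (fun h' => h (List.mem_cons_of_mem _ h'))]

theorem mergeGroups_merge (p q : List String) (u : List Int) (a b : Int) (v : List Int)
    (hp : "+" ∉ p) (hl : u.length = p.length) :
    mergeGroups (u ++ a :: b :: v) (p ++ "+" :: q) = mergeGroups (u ++ (a + b) :: v) (p ++ q) := by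
  induction p generalizing u with
  | nil =>
    have : u = [] := by simpa using hl
    subst this; simp [mergeGroups]
  | cons o p' ih =>
    cases u with
    | nil => simp at hl
    | cons x u' =>
      have ho : o ≠ "+" := fun h' => hp (h' ▸ List.mem_cons_self)
      have hp' : "+" ∉ p' := fun h' => hp (List.mem_cons_of_mem _ h')
      have hl' : u'.length = p'.length := by simpa using hl
      rw [mergeGroups.eq_def]
      conv_rhs => rw [mergeGroups.eq_def]
      simp_all [ih u' hp' hl']

-- one A-step on a state with a '+' present, in decomposed form
theorem add_allStep_eq (p q : List String) (u : List Int) (a b : Int) (v : List Int)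
    (hp : "+" ∉ p) (hl : u.length = p.length) :
    add_allStep (u ++ a :: b :: v, p ++ "+" :: q) = (u ++ (a + b) :: v, p ++ q) := by
  have hidx : PySem.List.index? (p ++ "+" :: q) "+" = some p.length := by
    rw [show p ++ "+" :: q = (p ++ ["+"]) ++ q by simp]
    rw [PySem.List.index?_append_of_mem q (by simp)]
    simpa using PySem.List.index?_append_singleton_self (l := p) (c := "+") hp
  unfold add_allStep
  simp only [hidx]
  have h1 : PySem.List.pyGet? (p ++ "+" :: q) (p.length : Int) = some "+" :=
    PySem.List.pyGet?_append_length (pre := p) (y := "+") (ys := q)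
  have h2 : PySem.List.pyGet? (u ++ a :: b :: v) (p.length : Int) = some a := by
    rw [← hl]; exact PySem.List.pyGet?_append_length (pre := u) (y := a) (ys := b :: v)
  have h3 : PySem.List.pyGet? (u ++ a :: b :: v) ((p.length : Int) + 1) = some b := by
    rw [← hl]
    have he : ((u.length : Int) + 1) = ((u ++ [a]).length : Int) := by simp
    rw [he]
    have := PySem.List.pyGet?_append_length (pre := u ++ [a]) (y := b) (ys := v)
    simpa [List.append_assoc] using this
  have h4 : PySem.List.slice (u ++ a :: b :: v) none (some (p.length : Int)) = u := by
    rw [PySem.List.slice_to_natCast, ← hl, List.take_left]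
  have h5 : PySem.List.slice (u ++ a :: b :: v) (some ((p.length : Int) + 2)) none = v := by
    have he : ((p.length : Int) + 2) = ((p.length + 2 : Nat) : Int) := by push_cast; ring
    rw [he, PySem.List.slice_from_natCast, ← hl]
    rw [show u.length + 2 = (u ++ [a, b]).length by simp]
    rw [show u ++ a :: b :: v = (u ++ [a, b]) ++ v by simp]
    exact List.drop_left
  have h6 : PySem.List.slice (p ++ "+" :: q) none (some (p.length : Int)) = p := by
    rw [PySem.List.slice_to_natCast, List.take_left]
  have h7 : PySem.List.slice (p ++ "+" :: q) (some ((p.length : Int) + 1)) none = q := by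
    have he : ((p.length : Int) + 1) = ((p.length + 1 : Nat) : Int) := by push_cast; ring
    rw [he, PySem.List.slice_from_natCast]
    rw [show p.length + 1 = (p ++ ["+"]).length by simp]
    rw [show p ++ "+" :: q = (p ++ ["+"]) ++ q by simp]
    exact List.drop_left
  simp [h2, h3, h4, h5, h6, h7]

-- decompose a Pre_-state containing a '+' (at its first occurrence)
theorem decompose (nums : List Int) (ops : List String) (hpre : Pre_add_all nums ops)
    (hmem : "+" ∈ ops) :
    ∃ p q u a b v, ops = p ++ "+" :: q ∧ "+" ∉ p ∧ nums = u ++ a :: b :: v ∧ u.length = p.length := by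
  obtain ⟨k, hk⟩ := Option.isSome_iff_exists.mp ((PySem.List.index?_isSome_iff ops "+").mpr hmem)
  obtain ⟨p, q, hops, hlen, hp⟩ := (PySem.List.index?_eq_some_iff ops "+" k).mp hk
  have hklen : p.length < ops.length := by subst hops; simp
  have hplus : ops.getD p.length "" = "+" := by
    subst hops; rw [List.getD_eq_getElem?_getD]; simp
  have hle : p.length + 2 ≤ nums.length := hpre p.length (by omega) hplus
  have hdlen : (nums.drop p.length).length ≥ 2 := by simp; omega
  obtain ⟨a, w, hw⟩ : ∃ a w, nums.drop p.length = a :: w := by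
    cases hd : nums.drop p.length with
    | nil => rw [hd] at hdlen; simp at hdlen
    | cons a w => exact ⟨a, w, rfl⟩
  obtain ⟨b, v, hv⟩ : ∃ b v, w = b :: v := by
    cases hv : w with
    | nil => rw [hw, hv] at hdlen; simp at hdlen
    | cons b v => exact ⟨b, v, rfl⟩
  refine ⟨p, q, nums.take p.length, a, b, v, hops, hp, ?_, ?_⟩
  · conv_lhs => rw [← List.take_append_drop p.length nums, hw, hv]
  · simp [List.length_take]; omega

-- Pre_ is preserved by one merge step
theorem pre_step (p q : List String) (u : List Int) (a b : Int) (v : List Int)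
    (hp : "+" ∉ p) (hl : u.length = p.length)
    (hpre : Pre_add_all (u ++ a :: b :: v) (p ++ "+" :: q)) :
    Pre_add_all (u ++ (a + b) :: v) (p ++ q) := by
  intro j hj hplus
  simp only [List.length_append, List.length_cons] at *
  by_cases hjp : j < p.length
  · exfalso
    rw [List.getD_append _ _ _ _ hjp, List.getD_eq_getElem _ _ hjp] at hplus
    exact hp (hplus ▸ List.getElem_mem hjp)
  · have hplus' : (p ++ "+" :: q).getD (j + 1) "" = "+" := by
      rw [List.getD_append_right _ _ _ _ (by omega)] at hplus ⊢
      have he : j + 1 - p.length = (j - p.length) + 1 := by omega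
      rw [he]; simpa using hplus
    have := hpre (j + 1) (by simp; omega) hplus'
    simp at this; omega

theorem count_step (p q : List String) (hp : "+" ∉ p) :
    PySem.List.count (p ++ "+" :: q) "+" = PySem.List.count (p ++ q) "+" + 1 := by
  simp [PySem.List.count_eq, List.count_append, List.count_eq_zero.mpr hp]

theorem filter_step (p q : List String) :
    (p ++ "+" :: q).filter (fun op => op != "+") = (p ++ q).filter (fun op => op != "+") := by
  simp

-- a fold that ignores the list elements is iteration
theorem foldl_const {α β : Type} (g : α → α) (l : List β) (st : α) :
    l.foldl (fun s _ => g s) st = g^[l.length] st := by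
  induction l generalizing st with
  | nil => rfl
  | cons x t ih => simp [List.foldl_cons, ih, Function.iterate_succ_apply]

-- A's loop, iterated count-many times, lands on (mergeGroups, filter)
theorem loop_iter (n : Nat) : ∀ (nums : List Int) (ops : List String),
    Pre_add_all nums ops → PySem.List.count ops "+" = n →
    add_allStep^[n] (nums, ops)
      = (mergeGroups nums ops, ops.filter (fun op => op != "+")) := by
  induction n with
  | zero =>
    intro nums ops _ hc
    have hnot : "+" ∉ ops := by
      rw [PySem.List.count_eq] at hc; exact List.count_eq_zero.mp hc
    have hf : ops.filter (fun op => op != "+") = ops :=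
      List.filter_eq_self.mpr (fun o ho => by
        simp only [bne_iff_ne, ne_eq]
        exact fun h => hnot (h ▸ ho))
    simp [Function.iterate_zero, mergeGroups_no_plus nums ops hnot, hf]
  | succ n ih =>
    intro nums ops hpre hc
    have hmem : "+" ∈ ops := by
      rw [PySem.List.count_eq] at hc
      exact List.count_pos_iff.mp (by omega)
    obtain ⟨p, q, u, a, b, v, hops, hp, hnums, hl⟩ := decompose nums ops hpre hmem
    subst hops hnums
    rw [Function.iterate_succ_apply, add_allStep_eq p q u a b v hp hl]
    rw [ih _ _ (pre_step p q u a b v hp hl hpre)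
      (by have := count_step p q hp; omega)]
    rw [mergeGroups_merge p q u a b v hp hl, filter_step]

-- the body of B's fold, named for the proofs
def bstep (ops : List String) (acc : List Int) (jx : Int × Int) : List Int :=
  if jx.1 > 0 && decide (jx.1 - 1 < (ops.length : Int)) && (PySem.List.pyGet? ops (jx.1 - 1) == some "+")
  then acc.dropLast ++ [(acc.getLast?.getD 0) + jx.2]
  else acc ++ [jx.2]

theorem add_all_alt_eq (nums : List Int) (ops : List String) :
    add_all_alt nums ops
      = ((PySem.List.enumerate nums 0).foldl (bstep ops) [], ops.filter (fun op => op != "+")) := rfl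

theorem mergeGroups_nil (ops : List String) : mergeGroups [] ops = [] := by
  rw [mergeGroups.eq_def]
  rcases ops with _ | ⟨o, t⟩
  · rfl
  · by_cases ho : o = "+" <;> simp [ho]

theorem mergeGroups_plus (a b : Int) (rest : List Int) (ops' : List String) :
    mergeGroups (a :: b :: rest) ("+" :: ops') = mergeGroups ((a + b) :: rest) ops' := by
  rw [mergeGroups.eq_def]; rfl

theorem mergeGroups_cons (a : Int) (rest : List Int) (o : String) (t : List String)
    (ho : o ≠ "+") : mergeGroups (a :: rest) (o :: t) = a :: mergeGroups rest t := by
  rw [mergeGroups.eq_def]; simp [ho]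

theorem mergeGroups_cons_nil (a : Int) (rest : List Int) :
    mergeGroups (a :: rest) [] = a :: mergeGroups rest [] := by
  rw [mergeGroups.eq_def]; rfl

-- B's fold from position j+1 with current group sum s computes the remaining groups
theorem B_loop (ops : List String) (rest : List Int) : ∀ (j : Nat) (acc : List Int) (s : Int),
    (∀ k, j ≤ k → k < ops.length → ops.getD k "" = "+" → k + 2 ≤ j + 1 + rest.length) →
    (PySem.List.enumerate rest ((j : Int) + 1)).foldl (bstep ops) (acc ++ [s])
      = acc ++ mergeGroups (s :: rest) (ops.drop j) := by
  induction rest with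
  | nil =>
    intro j acc s hpre
    simp only [PySem.List.enumerate_nil, List.foldl_nil]
    cases hd : ops.drop j with
    | nil => rw [mergeGroups_cons_nil, mergeGroups_nil]
    | cons o t =>
      have hj : j < ops.length := by
        by_contra h
        rw [List.drop_eq_nil_of_le (by omega)] at hd; simp at hd
      have ho : o ≠ "+" := by
        intro h; subst h
        have hget : ops.getD j "" = "+" := by
          rw [List.drop_eq_getElem_cons hj] at hd
          injection hd with h1 h2
          rw [List.getD_eq_getElem _ _ hj, h1]
        have := hpre j le_rfl hj hget; simp at this
      rw [mergeGroups_cons _ _ _ _ ho, mergeGroups_nil]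
  | cons x rest' ih =>
    intro j acc s hpre
    have hen : PySem.List.enumerate (x :: rest') ((j : Int) + 1)
        = ((j : Int) + 1, x) :: PySem.List.enumerate rest' ((j : Int) + 2) := by
      rw [PySem.List.enumerate_cons]; ring_nf
    rw [hen, List.foldl_cons]
    by_cases hj : j < ops.length
    · have hget : ops[j]? = some ops[j] := List.getElem?_eq_getElem hj
      by_cases hplus : ops[j] = "+"
      · have hstep : bstep ops (acc ++ [s]) ((j : Int) + 1, x) = acc ++ [s + x] := by
          unfold bstep
          rw [show (((j : Int) + 1, x) : Int × Int).1 - 1 = (j : Int) from by simp]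
          simp [hplus, hj]
        rw [hstep]
        have hih := ih (j + 1) acc (s + x)
          (fun k hk1 hk2 hk3 => by have := hpre k (by omega) hk2 hk3; simp at this ⊢; omega)
        have hcast : ((j + 1 : Nat) : Int) + 1 = (j : Int) + 2 := by push_cast; ring
        rw [hcast] at hih
        rw [hih, List.drop_eq_getElem_cons hj, hplus, mergeGroups_plus]
      · have hstep : bstep ops (acc ++ [s]) ((j : Int) + 1, x) = (acc ++ [s]) ++ [x] := by
          unfold bstep
          rw [show (((j : Int) + 1, x) : Int × Int).1 - 1 = (j : Int) from by simp]
          have h2 : ops[j]? ≠ some "+" := by rw [hget]; simp [hplus]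
          simp [PySem.List.pyGet?_natCast, h2]
        rw [hstep]
        have hih := ih (j + 1) (acc ++ [s]) x
          (fun k hk1 hk2 hk3 => by have := hpre k (by omega) hk2 hk3; simp at this ⊢; omega)
        have hcast : ((j + 1 : Nat) : Int) + 1 = (j : Int) + 2 := by push_cast; ring
        rw [hcast] at hih
        rw [hih, List.append_assoc]
        congr 1
        rw [List.drop_eq_getElem_cons hj, mergeGroups_cons _ _ _ _ hplus]
        rfl
    · have hstep : bstep ops (acc ++ [s]) ((j : Int) + 1, x) = (acc ++ [s]) ++ [x] := by
        unfold bstep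
        rw [show (((j : Int) + 1, x) : Int × Int).1 - 1 = (j : Int) from by simp]
        have h1 : ¬((j : Int) < (ops.length : Int)) := by exact_mod_cast hj
        simp [h1]
      rw [hstep]
      have hih := ih (j + 1) (acc ++ [s]) x
        (fun k hk1 hk2 hk3 => by have := hpre k (by omega) hk2 hk3; simp at this ⊢; omega)
      have hcast : ((j + 1 : Nat) : Int) + 1 = (j : Int) + 2 := by push_cast; ring
      rw [hcast] at hih
      rw [hih, List.append_assoc]
      have hd1 : ops.drop j = [] := List.drop_eq_nil_of_le (by omega)
      have hd2 : ops.drop (j + 1) = [] := List.drop_eq_nil_of_le (by omega)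
      rw [hd1, hd2, mergeGroups_cons_nil]
      simp [mergeGroups_cons_nil]

theorem B_eq (nums : List Int) (ops : List String) (hpre : Pre_add_all nums ops) :
    add_all_alt nums ops = (mergeGroups nums ops, ops.filter (fun op => op != "+")) := by
  rw [add_all_alt_eq]
  cases nums with
  | nil => rw [mergeGroups_nil]; rfl
  | cons s rest =>
    congr 1
    rw [PySem.List.enumerate_cons, List.foldl_cons]
    have h0 : bstep ops [] ((0 : Int), s) = [] ++ [s] := by unfold bstep; simp
    rw [h0]
    have hb := B_loop ops rest 0 [] s (fun k _ hk2 hk3 => by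
      have := hpre k hk2 hk3; simp at this ⊢; omega)
    simp only [Nat.cast_zero] at hb
    simpa using hb

-- ===== VERDICT (by name: the statement is the Claim_ definition above) =====
theorem add_all_spec : Claim_equal_add_all := by
  intro nums ops _ hpre
  unfold Spec_add_all add_all
  rw [foldl_const, List.length_range,
    loop_iter (PySem.List.count ops "+") nums ops hpre rfl, B_eq nums ops hpre]
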